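-- pv_equiv track=rewrite | github.com/ZorranGit/CS1410 | DNA Sequencing/dna.py | findBestCandidate
-- ===== SOURCE A (Python) =====
-- def findLargestOverlap(target, candidate):
--     if not target and not candidate:
--         return -1
--     if len(target) != len(candidate):
--         return -1
--     length = len(target)
--     overlap = 0
--     for x in range(length):
--         if target[length - x - 1: length] == candidate[0: x + 1]:
--             overlap = x + 1
--     if not overlap:
--         return (0)
--     else:
--         return overlap
--
-- def findBestCandidate(target, string):
--     overlap = []
--     for x in range(len(string)):
--         overlap.append(findLargestOverlap(target, string[x]))
--     best_cand_length = max(overlap)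
--     best_cand = overlap.index(best_cand_length)
--     if overlap[best_cand] == 0:
--         return ('', 0)
--     return (string[best_cand], overlap[best_cand])
-- ===== SOURCE B (Python) =====
-- def findBestCandidate(target, string):
--     # One pass over the candidates keeping the first strictly-best (candidate, overlap)
--     # pair; the overlap itself is found by scanning lengths downward and returning at
--     # the first suffix/prefix match.
--     best_s = string[0]
--     best_v = _overlap(target, best_s)
--     for s in string[1:]:
--         v = _overlap(target, s)
--         if v > best_v:
--             best_s, best_v = s, v
--     if best_v == 0:
--         return ('', 0)
--     return (best_s, best_v)
--
-- def _overlap(target, candidate):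
--     n = len(target)
--     if n != len(candidate) or n == 0:
--         return -1
--     for k in range(n, 0, -1):
--         if target[n - k:] == candidate[:k]:
--             return k
--     return 0
-- ===== Notes on version B (the rewrite author's own statement) =====
-- stated objective: alternative
-- what changed: B folds once over the candidates keeping the first strictly-best (candidate, overlap) pair instead of A's build-a-full-overlap-list then max() then list.index() then re-index passes, and computes each overlap by scanning lengths downward and returning at the first suffix/prefix match instead of A's upward loop that remembers the last match.
import Mathlib
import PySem

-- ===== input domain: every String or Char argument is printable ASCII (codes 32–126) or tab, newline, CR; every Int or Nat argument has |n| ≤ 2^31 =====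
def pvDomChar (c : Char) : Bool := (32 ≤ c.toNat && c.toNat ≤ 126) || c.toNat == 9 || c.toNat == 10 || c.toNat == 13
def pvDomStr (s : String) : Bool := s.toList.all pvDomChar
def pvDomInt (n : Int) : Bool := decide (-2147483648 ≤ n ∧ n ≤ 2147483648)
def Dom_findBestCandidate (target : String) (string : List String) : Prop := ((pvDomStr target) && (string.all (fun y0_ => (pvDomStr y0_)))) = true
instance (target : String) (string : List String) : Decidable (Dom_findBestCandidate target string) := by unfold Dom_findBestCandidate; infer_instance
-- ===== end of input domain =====

-- B replaces A's build-a-list-then-max-then-index passes by a single fold keeping the first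
-- strictly-best (candidate, overlap) pair, and A's upward last-match overlap loop by a
-- downward first-match scan (objective: alternative decomposition, same exact return value).

-- ===== PORT A =====
-- string slicing/equality is ported on .toList via PySem.List.slice (exact per the Chars bridge)
def findLargestOverlap (target : String) (candidate : String) : Int :=
  if target.toList = [] ∧ candidate.toList = [] then -1
  else if ¬ ((target.toList.length : Int) = (candidate.toList.length : Int)) then -1
  else
    let length : Int := (target.toList.length : Int)
    let overlap : Int :=
      (PySem.List.pyRange 0 length 1).foldl
        (fun ov x =>
          if PySem.List.slice target.toList (some (length - x - 1)) (some length)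
             = PySem.List.slice candidate.toList (some 0) (some (x + 1))
          then x + 1 else ov) 0
    if overlap = 0 then (0 : Int) else overlap

def findBestCandidate (target : String) (string : List String) : String × Int :=
  let overlap : List Int :=
    (PySem.List.pyRange 0 (PySem.List.len string) 1).foldl
      (fun acc x => acc ++ [findLargestOverlap target (PySem.List.pyGetD string x "")]) []
  match PySem.List.max? overlap (fun v => v) with
  | none => ("", 0)  -- max([]) raises ValueError in Python: excluded by Pre_
  | some best_cand_length =>
    match PySem.List.index? overlap best_cand_length with
    | none => ("", 0)  -- unreachable: the maximum is in the list
    | some best_cand =>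
      if PySem.List.pyGetD overlap (best_cand : Int) 0 = 0 then ("", 0)
      else (PySem.List.pyGetD string (best_cand : Int) "",
            PySem.List.pyGetD overlap (best_cand : Int) 0)

-- ===== PORT B =====
-- _overlap's downward scan 'for k in range(n, 0, -1)' as structural recursion on k
def overlapScan (t c : List Char) : Nat → Int
  | 0 => 0
  | k + 1 =>
    if PySem.List.slice t (some ((t.length : Int) - ((k : Int) + 1))) none
       = PySem.List.slice c none (some ((k : Int) + 1))
    then (k : Int) + 1 else overlapScan t c k

def overlapAlt (target : String) (candidate : String) : Int :=
  let n := target.toList.length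
  if n ≠ candidate.toList.length ∨ n = 0 then -1
  else overlapScan target.toList candidate.toList n

def bestStep (target : String) (st : String × Int) (s : String) : String × Int :=
  let v := overlapAlt target s
  if v > st.2 then (s, v) else st

def findBestCandidate_alt (target : String) (string : List String) : String × Int :=
  match string with
  | [] => ("", 0)  -- string[0] raises IndexError in Python B: excluded by Pre_
  | s :: rest =>
    let best := rest.foldl (bestStep target) (s, overlapAlt target s)
    if best.2 = 0 then ("", 0) else best

-- ===== PRECONDITION & SPEC =====
-- Pre_ excludes only the empty candidate list, on which A raises ValueError (max of an empty list).
def Pre_findBestCandidate (target : String) (string : List String) : Prop := string ≠ []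
instance (target : String) (string : List String) : Decidable (Pre_findBestCandidate target string) := by unfold Pre_findBestCandidate; infer_instance
def pvWitness_findBestCandidate : String × List String := ("ab", ["ba", "xx"])

def Spec_findBestCandidate (target : String) (string : List String) (out : String × Int) : Prop := out = findBestCandidate_alt target string
instance (target : String) (string : List String) (out : String × Int) : Decidable (Spec_findBestCandidate target string out) := by unfold Spec_findBestCandidate; infer_instance

-- ===== CLAIM (what is proved, stated in full; the proofs are below) =====
def Claim_equal_findBestCandidate : Prop := ∀ (target : String) (string : List String), Dom_findBestCandidate target string → Pre_findBestCandidate target string → Spec_findBestCandidate target string (findBestCandidate target string)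

-- ===== LEMMAS AND PROOFS =====

theorem idxOf?_of_mem {α : Type} [BEq α] [LawfulBEq α] (a : α) (l : List α) (h : a ∈ l) :
    List.idxOf? a l = some (List.idxOf a l) := by
  induction l with
  | nil => simp at h
  | cons b t ih =>
    by_cases hba : b = a
    · simp [List.idxOf?_cons, hba]
    · have ht : a ∈ t := by
        rcases List.mem_cons.mp h with h1 | h1
        · exact absurd h1.symm hba
        · exact h1
      simp [List.idxOf?_cons, hba, ih ht]

theorem idxOf_cons_int (a b : Int) (l : List Int) :
    List.idxOf a (b :: l) = if b = a then 0 else List.idxOf a l + 1 := by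
  simp [List.idxOf_cons]

-- A's upward last-match fold equals B's downward first-match scan, up to any bound m ≤ |t|
theorem fold_eq_scan (t c : List Char) (m : Nat) (hm : m ≤ t.length) :
    (List.range m).foldl
      (fun ov (x : Nat) =>
        if PySem.List.slice t (some ((t.length : Int) - (x : Int) - 1)) (some (t.length : Int))
           = PySem.List.slice c (some 0) (some ((x : Int) + 1))
        then (x : Int) + 1 else ov) 0
    = overlapScan t c m := by
  induction m with
  | zero => simp [overlapScan]
  | succ k ih =>
    rw [List.range_succ, List.foldl_append, ih (by omega)]
    simp only [List.foldl_cons, List.foldl_nil, overlapScan]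
    have h1 : PySem.List.slice t (some ((t.length : Int) - (k : Int) - 1)) (some (t.length : Int))
        = t.drop (t.length - k - 1) := by
      have e : ((t.length : Int) - (k : Int) - 1) = ((t.length - k - 1 : Nat) : Int) := by
        push_cast [Nat.sub_sub]; omega
      rw [e, PySem.List.slice_natCast]
      apply List.take_of_length_le
      simp
    have h1' : PySem.List.slice t (some ((t.length : Int) - ((k : Int) + 1))) none
        = t.drop (t.length - k - 1) := by
      have e : ((t.length : Int) - ((k : Int) + 1)) = ((t.length - k - 1 : Nat) : Int) := by
        push_cast [Nat.sub_sub]; omega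
      rw [e, PySem.List.slice_from_natCast]
    have h2 : PySem.List.slice c (some 0) (some ((k : Int) + 1)) = c.take (k + 1) := by
      rw [PySem.List.slice_zero_start]
      have e : ((k : Int) + 1) = ((k + 1 : Nat) : Int) := by push_cast; ring
      rw [e, PySem.List.slice_to_natCast]
    have h2' : PySem.List.slice c none (some ((k : Int) + 1)) = c.take (k + 1) := by
      have e : ((k : Int) + 1) = ((k + 1 : Nat) : Int) := by push_cast; ring
      rw [e, PySem.List.slice_to_natCast]
    rw [h1, h1', h2, h2']

-- the two overlap helpers agree on every pair of strings
theorem overlap_eq (target candidate : String) :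
    findLargestOverlap target candidate = overlapAlt target candidate := by
  unfold findLargestOverlap overlapAlt
  by_cases hlen : target.toList.length = candidate.toList.length
  · by_cases h0 : target.toList.length = 0
    · have ht : target.toList = [] := List.eq_nil_of_length_eq_zero h0
      have hc : candidate.toList = [] := List.eq_nil_of_length_eq_zero (hlen ▸ h0)
      simp [ht, hc]
    · have hne : ¬ (target.toList = [] ∧ candidate.toList = []) := by
        intro ⟨h1, _⟩; exact h0 (by simp [h1])
      have e1 : ((target.toList.length : Int) = (candidate.toList.length : Int)) := by
        exact_mod_cast hlen
      rw [if_neg hne, if_neg (not_not_intro e1),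
        if_neg (by omega : ¬ (target.toList.length ≠ candidate.toList.length ∨ target.toList.length = 0))]
      dsimp only
      rw [PySem.List.pyRange_zero_nat, List.foldl_map, fold_eq_scan _ _ _ le_rfl]
      split <;> simp_all
  · have hne : ¬ (target.toList = [] ∧ candidate.toList = []) := by
      intro ⟨h1, h2⟩; exact hlen (by simp [h1, h2])
    have e1 : ¬ ((target.toList.length : Int) = (candidate.toList.length : Int)) := by
      exact_mod_cast hlen
    rw [if_neg hne, if_pos e1, if_pos (Or.inl hlen)]

-- B's fold keeps exactly the first maximal (name, value) pair
theorem bestFold (target : String) (rest : List String) :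
    ∀ (bs : String) (bv : Int),
      rest.foldl (bestStep target) (bs, bv)
      = ((bs :: rest).getD
           (List.idxOf ((rest.map (overlapAlt target)).foldl max bv)
             (bv :: rest.map (overlapAlt target))) bs,
         (rest.map (overlapAlt target)).foldl max bv) := by
  induction rest with
  | nil => intro bs bv; simp
  | cons s' rest ih =>
    intro bs bv
    set f := overlapAlt target with hf
    by_cases h : f s' > bv
    · have step : bestStep target (bs, bv) s' = (s', f s') := by
        simp only [bestStep, ← hf]; rw [if_pos h]
      have hmax : max bv (f s') = f s' := max_eq_right (le_of_lt h)
      have hle : f s' ≤ (rest.map f).foldl max (f s') := (PySem.List.le_foldl_max _ _).1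
      have hbv_ne : bv ≠ (rest.map f).foldl max (f s') := by omega
      rw [List.foldl_cons, step, ih]
      simp only [List.map_cons, List.foldl_cons, hmax]
      rw [idxOf_cons_int _ bv _, if_neg hbv_ne]
      have hmem : (rest.map f).foldl max (f s') ∈ f s' :: rest.map f := by
        rcases PySem.List.foldl_max_mem (rest.map f) (f s') with h1 | h1
        · rw [h1]; exact List.mem_cons_self
        · exact List.mem_cons_of_mem _ h1
      have hlt' : List.idxOf ((rest.map f).foldl max (f s')) (f s' :: rest.map f)
          < (s' :: rest).length := by simpa using List.idxOf_lt_length_of_mem hmem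
      rw [List.getD_cons_succ]
      rw [List.getD_eq_getElem _ _ hlt', List.getD_eq_getElem _ _ hlt']
    · have step : bestStep target (bs, bv) s' = (bs, bv) := by
        simp only [bestStep, ← hf]; rw [if_neg h]
      have hle : f s' ≤ bv := by omega
      have hmax : max bv (f s') = bv := max_eq_left hle
      rw [List.foldl_cons, step, ih]
      simp only [List.map_cons, List.foldl_cons, hmax]
      set M := (rest.map f).foldl max bv with hM
      by_cases hbvM : bv = M
      · rw [idxOf_cons_int _ bv _, if_pos hbvM, idxOf_cons_int _ bv _, if_pos hbvM]
        simp
      · have hbvle : bv ≤ M := (PySem.List.le_foldl_max _ _).1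
        have hfne : f s' ≠ M := by omega
        have hMmem : M ∈ rest.map f := by
          rcases PySem.List.foldl_max_mem (rest.map f) bv with h1 | h1
          · exact absurd h1.symm hbvM
          · exact h1
        rw [idxOf_cons_int _ bv _, if_neg hbvM,
            idxOf_cons_int _ bv _, if_neg hbvM,
            idxOf_cons_int _ (f s') _, if_neg hfne]
        rw [List.getD_cons_succ, List.getD_cons_succ, List.getD_cons_succ]

-- the two full programs agree on every nonempty candidate list
theorem main_eq (target : String) (string : List String) (hpre : string ≠ []) :
    findBestCandidate target string = findBestCandidate_alt target string := by
  obtain ⟨s, rest, rfl⟩ := List.exists_cons_of_ne_nil hpre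
  set f := overlapAlt target with hf
  have hover : (PySem.List.pyRange 0 (PySem.List.len (s :: rest)) 1).foldl
      (fun acc x => acc ++ [findLargestOverlap target (PySem.List.pyGetD (s :: rest) x "")]) []
      = (s :: rest).map f := by
    rw [PySem.List.foldl_append_singleton_eq_map, List.nil_append]
    calc List.map (fun x => findLargestOverlap target (PySem.List.pyGetD (s :: rest) x ""))
          (PySem.List.pyRange 0 (PySem.List.len (s :: rest)) 1)
        = List.map (findLargestOverlap target)
            (List.map (fun j => PySem.List.pyGetD (s :: rest) j "")
              (PySem.List.pyRange 0 (PySem.List.len (s :: rest)) 1)) := by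
          rw [List.map_map]; rfl
      _ = List.map (findLargestOverlap target) (s :: rest) := by
          rw [PySem.List.map_pyGetD_pyRange_zero]
      _ = (s :: rest).map f := by
          rw [hf, funext (overlap_eq target)]
  set L := (s :: rest).map f with hL
  have hLcons : L = f s :: rest.map f := by simp [hL]
  set M := (rest.map f).foldl max (f s) with hM
  have hmemL : M ∈ L := by
    rw [hLcons]
    rcases PySem.List.foldl_max_mem (rest.map f) (f s) with h1 | h1
    · rw [hM, h1]; exact List.mem_cons_self
    · exact List.mem_cons_of_mem _ (hM ▸ h1)
  have hmax : PySem.List.max? L (fun v => v) = some M := by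
    rw [hLcons, PySem.List.max?_id_cons, hM]
  have hidx : PySem.List.index? L M = some (List.idxOf M L) := by
    rw [PySem.List.index?_eq_idxOf?, idxOf?_of_mem _ _ hmemL]
  have hiL : List.idxOf M L < L.length := List.idxOf_lt_length_of_mem hmemL
  have hilen : List.idxOf M L < (s :: rest).length := by simpa [hL] using hiL
  have hget : L.getD (List.idxOf M L) 0 = M := by
    rw [List.getD_eq_getElem _ _ hiL, List.getElem_idxOf hiL]
  unfold findBestCandidate findBestCandidate_alt
  simp only [hover, hmax, hidx]
  rw [bestFold, ← hf, ← hM, ← hLcons]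
  simp only [PySem.List.pyGetD_natCast, hget]
  by_cases hM0 : M = 0
  · rw [if_pos hM0, if_pos hM0]
  · rw [if_neg hM0, if_neg hM0,
      List.getD_eq_getElem _ _ hilen, List.getD_eq_getElem _ _ hilen]

-- ===== VERDICT (by name: the statement is the Claim_ definition above) =====
theorem findBestCandidate_spec : Claim_equal_findBestCandidate := by
  intro target string _ hpre
  exact main_eq target string hpre
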